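-- pv_equiv track=rewrite | github.com/knyttstory/HoSIM | preprocess_data.py | count_community_information
-- ===== SOURCE A (Python) =====
-- def count_community_information(community_data):
--     node_community = dict()
--     number_node = dict()
--     for ci, cd in enumerate(community_data):
--         for tn in cd:
--             if tn not in node_community:
--                 node_community[tn] = list()
--             node_community[tn].append(ci)
--     for nc in node_community:
--         if len(node_community[nc]) not in number_node:
--             number_node[len(node_community[nc])] = list()
--         number_node[len(node_community[nc])].append(nc)
--     return node_community, number_node
-- ===== SOURCE B (Python) =====
-- def count_community_information(community_data):
--     # Flatten to (node, community-index) pairs, then build each dict by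
--     # ordered key-dedup + a filtering comprehension per key.
--     pairs = [(tn, ci) for ci, cd in enumerate(community_data) for tn in cd]
--     node_keys = list(dict.fromkeys(tn for tn, _ in pairs))
--     node_community = {n: [ci for tn, ci in pairs if tn == n] for n in node_keys}
--     counts = list(dict.fromkeys(len(cs) for cs in node_community.values()))
--     number_node = {c: [n for n, cs in node_community.items() if len(cs) == c]
--                    for c in counts}
--     return node_community, number_node
-- ===== Notes on version B (the rewrite author's own statement) =====
-- stated objective: alternative
-- what changed: Replaces A's incremental dict-of-lists bucketing (conditional empty-list insert then append, for both dicts) by flattening to (node, community) pairs, ordered key-dedup via dict.fromkeys, and one filtering comprehension per distinct key/count.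
import Mathlib
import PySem

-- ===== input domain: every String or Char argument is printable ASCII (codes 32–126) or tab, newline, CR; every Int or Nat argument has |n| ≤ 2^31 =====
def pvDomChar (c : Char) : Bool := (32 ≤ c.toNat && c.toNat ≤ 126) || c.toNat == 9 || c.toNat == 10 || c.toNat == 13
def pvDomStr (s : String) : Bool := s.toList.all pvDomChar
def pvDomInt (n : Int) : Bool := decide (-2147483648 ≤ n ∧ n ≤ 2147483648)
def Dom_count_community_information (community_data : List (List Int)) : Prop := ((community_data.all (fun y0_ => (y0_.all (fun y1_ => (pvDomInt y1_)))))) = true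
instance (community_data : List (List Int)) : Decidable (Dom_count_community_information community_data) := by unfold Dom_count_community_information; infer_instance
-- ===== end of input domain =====

-- B groups by flattening to (node, community) pairs, ordered key-dedup and a filtering
-- comprehension per distinct key/count, instead of A's incremental dict-of-lists bucketing
-- (alternative decomposition, not claimed faster).

-- ===== PORT A =====
def count_community_information (community_data : List (List Int)) : (List (Int × List Int)) × (List (Int × List Int)) :=
  let node_community : PySem.Dict Int (List Int) :=
    (PySem.List.enumerate community_data).foldl
      (fun nc p => p.2.foldl
        (fun nc tn =>
          (if nc.contains tn then nc else nc.insert tn []).modify tn [] (· ++ [p.1]))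
        nc)
      PySem.Dict.empty
  let number_node : PySem.Dict Int (List Int) :=
    node_community.keys.foldl
      (fun nn k =>
        -- len(node_community[nc]): the key is always present (we iterate this dict's keys),
        -- so Dict.getD is exact for node_community[nc] here
        (if nn.contains ((node_community.getD k []).length : Int) then nn
         else nn.insert ((node_community.getD k []).length : Int) []).modify
          ((node_community.getD k []).length : Int) [] (· ++ [k]))
      PySem.Dict.empty
  (node_community.items, number_node.items)

-- ===== PORT B =====
def count_community_information_alt (community_data : List (List Int)) : (List (Int × List Int)) × (List (Int × List Int)) :=
  let pairs : List (Int × Int) :=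
    (PySem.List.enumerate community_data).flatMap (fun p => p.2.map (fun tn => (tn, p.1)))
  let nodeKeys : List Int := PySem.List.dedup (pairs.map (·.1))
  let node_community : List (Int × List Int) :=
    nodeKeys.map (fun n => (n, (pairs.filter (fun q => q.1 == n)).map (·.2)))
  let counts : List Int := PySem.List.dedup (node_community.map (fun p => (p.2.length : Int)))
  let number_node : List (Int × List Int) :=
    counts.map (fun c => (c, (node_community.filter (fun p => (p.2.length : Int) == c)).map (·.1)))
  (node_community, number_node)

-- ===== PRECONDITION & SPEC =====
def Spec_count_community_information (community_data : List (List Int)) (out : (List (Int × List Int)) × (List (Int × List Int))) : Prop := out = count_community_information_alt community_data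
instance (community_data : List (List Int)) (out : (List (Int × List Int)) × (List (Int × List Int))) : Decidable (Spec_count_community_information community_data out) := by unfold Spec_count_community_information; infer_instance

-- ===== CLAIM (what is proved, stated in full; the proofs are below) =====
def Claim_equal_count_community_information : Prop := ∀ (community_data : List (List Int)), Dom_count_community_information community_data → Spec_count_community_information community_data (count_community_information community_data)

-- ===== LEMMAS AND PROOFS =====

-- A's 'if key missing: d[key] = []; then d[key].append(v)' is exactly Dict.modify with default [].
theorem pv_step_eq (d : PySem.Dict Int (List Int)) (k : Int) (v : Int) :
    (if d.contains k then d else d.insert k []).modify k [] (· ++ [v])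
      = d.modify k [] (· ++ [v]) := by
  by_cases h : d.contains k = true
  · simp [h]
  · simp only [Bool.not_eq_true] at h
    simp [h, PySem.Dict.modify, PySem.Dict.getD_insert_self, PySem.Dict.insert_insert_self]
    rw [PySem.Dict.getD_of_not_contains d _ h]
    simp

-- A's nested loop over enumerate(community_data) is the flat loop over (node, index) pairs.
theorem pv_flatten (l : List (Int × List Int)) (init : PySem.Dict Int (List Int)) :
    l.foldl (fun nc p => p.2.foldl (fun nc tn => nc.modify tn [] (· ++ [p.1])) nc) init
      = (l.flatMap (fun p => p.2.map (fun tn => (tn, p.1)))).foldl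
          (fun d q => d.modify q.1 [] (· ++ [q.2])) init := by
  rw [List.foldl_flatMap]
  simp only [List.foldl_map]

-- A's second loop, keyed by the membership count, as a flat loop over (count, node) pairs.
theorem pv_keyed (K : List Int) (lenf : Int → Int) (init : PySem.Dict Int (List Int)) :
    K.foldl (fun nn k => nn.modify (lenf k) [] (· ++ [k])) init
      = (K.map (fun k => (lenf k, k))).foldl (fun d q => d.modify q.1 [] (· ++ [q.2])) init := by
  simp only [List.foldl_map]

-- Keys of the grouping fold: the distinct first components, in first-appearance order.
theorem pv_keys_eq (l : List (Int × Int)) :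
    (l.foldl (fun d p => d.modify p.1 [] (· ++ [p.2])) PySem.Dict.empty).keys
      = PySem.List.dedup (l.map (·.1)) := by
  have h := PySem.Dict.keys_foldl_modify_key l (fun p : Int × Int => p.1) []
      (fun _ p => (· ++ [p.2])) PySem.Dict.empty
  simpa [PySem.List.dedup_eq_ofList] using h

-- Value of the grouping fold at any key: the second components of the matching pairs.
theorem pv_getD_eq (l : List (Int × Int)) (c : Int) :
    (l.foldl (fun d p => d.modify p.1 [] (· ++ [p.2])) PySem.Dict.empty).getD c []
      = (l.filter (fun q => q.1 == c)).map (·.2) := by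
  rw [PySem.Dict.getD_foldl_modify_append]
  simp

-- The grouping fold, as an items list, is B's dedup-keys-then-filter construction.
theorem pv_group_eq (l : List (Int × Int)) :
    (l.foldl (fun d p => d.modify p.1 [] (· ++ [p.2])) PySem.Dict.empty).items
      = (PySem.List.dedup (l.map (·.1))).map
          (fun k => (k, (l.filter (fun q => q.1 == k)).map (·.2))) := by
  have hnd : (l.foldl (fun d p => d.modify p.1 [] (· ++ [p.2])) PySem.Dict.empty).keys.Nodup := by
    rw [pv_keys_eq]
    exact PySem.List.nodup_dedup _
  rw [PySem.Dict.items_eq_map_keys _ hnd [], pv_keys_eq]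
  exact List.map_congr_left (fun k _ => by rw [pv_getD_eq])

-- ===== VERDICT (by name: the statement is the Claim_ definition above) =====
theorem count_community_information_spec : Claim_equal_count_community_information := by
  intro cd _
  unfold Spec_count_community_information count_community_information count_community_information_alt
  simp only [pv_step_eq, pv_flatten]
  generalize (PySem.List.enumerate cd).flatMap (fun p => p.2.map (fun tn => (tn, p.1))) = pairs
  set D := pairs.foldl (fun d q => d.modify q.1 [] (· ++ [q.2])) PySem.Dict.empty with hD
  refine Prod.ext ?_ ?_
  · rw [hD, pv_group_eq]
  · rw [pv_keyed D.keys (fun k => ((D.getD k []).length : Int)) PySem.Dict.empty]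
    simp only [pv_group_eq, hD, pv_getD_eq, pv_keys_eq, List.map_map, List.filter_map,
      Function.comp_def, List.map_id']
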